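-- pv_equiv track=rewrite | github.com/cratpij/logslice | logslice/tail.py | tail_records
-- ===== SOURCE A (Python) =====
-- from typing import Iterable, Iterator
-- from collections import deque
--
-- def tail_records(
--     records: Iterable[dict],
--     n: int,
-- ) -> list[dict]:
--     """Return the last *n* records from *records* using a circular buffer."""
--     if n <= 0:
--         return []
--     buf: deque[dict] = deque(maxlen=n)
--     for record in records:
--         buf.append(record)
--     return list(buf)
-- ===== SOURCE B (Python) =====
-- def tail_records(records, n):
--     """Return the last *n* records by materializing and negative slicing."""
--     if n <= 0:
--         return []
--     return list(records)[-n:]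
-- ===== Notes on version B (the rewrite author's own statement) =====
-- stated objective: simpler
-- what changed: Replaces the streaming bounded-deque append loop with a single full materialization plus a negative slice [-n:]; no explicit loop or O(n) window is maintained.
import Mathlib
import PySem

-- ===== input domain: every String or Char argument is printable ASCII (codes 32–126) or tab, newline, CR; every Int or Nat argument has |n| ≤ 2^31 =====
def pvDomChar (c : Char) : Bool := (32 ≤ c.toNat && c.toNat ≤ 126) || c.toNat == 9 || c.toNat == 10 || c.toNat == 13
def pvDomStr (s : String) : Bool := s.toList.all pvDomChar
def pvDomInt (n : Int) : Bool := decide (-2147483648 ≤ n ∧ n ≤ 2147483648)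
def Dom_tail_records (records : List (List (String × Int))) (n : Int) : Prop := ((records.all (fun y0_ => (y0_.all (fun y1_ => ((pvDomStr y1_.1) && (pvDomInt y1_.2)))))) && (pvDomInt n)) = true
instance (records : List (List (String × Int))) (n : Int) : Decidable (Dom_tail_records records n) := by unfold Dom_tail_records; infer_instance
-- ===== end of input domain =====

-- B replaces A's bounded-deque append loop by full materialization + a negative slice [-n:]; objective: simpler.
-- ===== PORT A =====
-- deque(maxlen=n).append: when the buffer is full, the leftmost element is discarded.
def tail_records (records : List (List (String × Int))) (n : Int) : List (List (String × Int)) :=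
  if n ≤ 0 then []
  else
    records.foldl
      (fun buf r =>
        if ((buf.length : Int) + 1) > n then ((buf ++ [r]).drop 1) else buf ++ [r]) []

-- ===== PORT B =====
def tail_records_alt (records : List (List (String × Int))) (n : Int) : List (List (String × Int)) :=
  if n ≤ 0 then []
  else PySem.List.slice records (some (-n)) none

-- ===== PRECONDITION & SPEC =====
def Spec_tail_records (records : List (List (String × Int))) (n : Int) (out : List (List (String × Int))) : Prop := out = tail_records_alt records n
instance (records : List (List (String × Int))) (n : Int) (out : List (List (String × Int))) : Decidable (Spec_tail_records records n out) := by unfold Spec_tail_records; infer_instance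

-- ===== CLAIM (what is proved, stated in full; the proofs are below) =====
def Claim_equal_tail_records : Prop := ∀ (records : List (List (String × Int))) (n : Int), Dom_tail_records records n → Spec_tail_records records n (tail_records records n)

-- ===== LEMMAS AND PROOFS =====
lemma deque_foldl (k : Nat) (hk : 0 < k) (xs : List (List (String × Int))) :
    xs.foldl
      (fun buf r =>
        if ((buf.length : Int) + 1) > (k : Int) then ((buf ++ [r]).drop 1) else buf ++ [r]) []
      = xs.drop (xs.length - k) := by
  induction xs using List.reverseRecOn with
  | nil => simp
  | append_singleton xs r ih =>
      rw [List.foldl_append, ih]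
      simp only [List.foldl_cons, List.foldl_nil]
      by_cases h : xs.length < k
      · have hc : ¬ (((List.drop (xs.length - k) xs).length : Int) + 1 > (k : Int)) := by
          rw [List.length_drop]; omega
        have h0 : xs.length - k = 0 := by omega
        have h2 : (xs ++ [r]).length - k = 0 := by simp; omega
        rw [if_neg hc, h0, h2, List.drop_zero, List.drop_zero]
      · have hc : (((List.drop (xs.length - k) xs).length : Int) + 1 > (k : Int)) := by
          rw [List.length_drop]; omega
        have e0 : (List.drop (xs.length - k) xs ++ [r]).drop 1
            = (List.drop (xs.length - k) xs).drop 1 ++ [r] :=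
          List.drop_append_of_le_length (by rw [List.length_drop]; omega)
        have e1 : (xs ++ [r]).drop ((xs ++ [r]).length - k)
            = xs.drop ((xs ++ [r]).length - k) ++ [r] :=
          List.drop_append_of_le_length (by simp; omega)
        have e2 : xs.length - k + 1 = (xs ++ [r]).length - k := by simp; omega
        rw [if_pos hc, e0, e1, List.drop_drop, e2]

-- ===== VERDICT (by name: the statement is the Claim_ definition above) =====
theorem tail_records_spec : Claim_equal_tail_records := by
  intro records n _
  unfold Spec_tail_records tail_records tail_records_alt
  by_cases h : n ≤ 0
  · simp [h]
  · obtain ⟨k, rfl⟩ : ∃ k : Nat, (k : Int) = n := ⟨n.toNat, Int.toNat_of_nonneg (by omega)⟩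
    have hk : 0 < k := by omega
    rw [if_neg h, if_neg h, deque_foldl k hk,
        PySem.List.slice_from_neg_natCast _ _ hk]
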